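-- pv_equiv track=rewrite | github.com/emmilco/clams | src/clams/storage/memory.py | _apply_filters
-- ===== SOURCE A (Python) =====
-- from typing import Any
--
-- def _apply_filters(
--     payloads: dict[str, dict[str, Any]], filters: dict[str, Any] | None
-- ) -> list[str]:
--     """Apply equality filters to payloads.
--
--     Returns list of IDs that match all filters.
--     """
--     if not filters:
--         return list(payloads.keys())
--
--     matching_ids = []
--     for id, payload in payloads.items():
--         # Check if all filter conditions match
--         matches = True
--         for key, value in filters.items():
--             if key not in payload or payload[key] != value:
--                 matches = False
--                 break
--
--         if matches:
--             matching_ids.append(id)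
--
--     return matching_ids
-- ===== SOURCE B (Python) =====
-- def _apply_filters(payloads, filters):
--     """Apply equality filters to payloads: narrow a candidate list per filter."""
--     candidates = list(payloads.items())
--     for key, value in (filters or {}).items():
--         candidates = [(i, p) for (i, p) in candidates
--                       if key in p and p[key] == value]
--     return [i for (i, _) in candidates]
-- ===== Notes on version B (the rewrite author's own statement) =====
-- stated objective: alternative
-- what changed: Transposed decomposition: instead of testing every payload against all filters with an inner break loop, B seeds a candidate list with all payload items and narrows it once per filter, finally projecting the surviving IDs.
import Mathlib
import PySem

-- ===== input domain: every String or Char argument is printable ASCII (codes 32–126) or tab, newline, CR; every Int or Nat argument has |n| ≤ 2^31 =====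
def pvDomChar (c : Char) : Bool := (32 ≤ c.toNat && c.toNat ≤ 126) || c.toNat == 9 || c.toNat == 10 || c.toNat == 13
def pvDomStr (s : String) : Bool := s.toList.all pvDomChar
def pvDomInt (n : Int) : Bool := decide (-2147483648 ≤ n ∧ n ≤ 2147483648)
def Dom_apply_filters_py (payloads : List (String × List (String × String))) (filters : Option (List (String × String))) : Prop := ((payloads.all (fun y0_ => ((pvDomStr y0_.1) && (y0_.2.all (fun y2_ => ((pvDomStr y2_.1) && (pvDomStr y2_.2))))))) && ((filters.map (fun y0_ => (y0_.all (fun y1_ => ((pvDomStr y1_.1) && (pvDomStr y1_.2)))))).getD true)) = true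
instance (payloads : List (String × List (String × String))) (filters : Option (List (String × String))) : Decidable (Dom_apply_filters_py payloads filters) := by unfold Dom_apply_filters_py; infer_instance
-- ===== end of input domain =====

-- B narrows one candidate list per filter (transposed decomposition) instead of testing each payload
-- against all filters with an inner break loop; alternative decomposition, same cost.


-- ===== PORT A =====
-- inner 'for key, value in filters.items(): … break' loop of A (matches flag with break)
def pvCheckA (payload : List (String × String)) : List (String × String) → Bool
  | [] => true
  | (k, v) :: rest =>
    match payload.lookup k with          -- 'key not in payload or payload[key] != value'
    | none => false
    | some v' => if v' != v then false else pvCheckA payload rest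

def apply_filters_py (payloads : List (String × List (String × String))) (filters : Option (List (String × String))) : List String :=
  match filters with
  | none => payloads.map (·.1)                 -- 'if not filters: return list(payloads.keys())'
  | some fs =>
    if fs = [] then payloads.map (·.1)
    else payloads.foldl (fun acc pr => if pvCheckA pr.2 fs then acc ++ [pr.1] else acc) []

-- ===== PORT B =====
-- 'key in p and p[key] == value' for one filter pair kv against payload p
def pvFilterMatch (kv : String × String) (p : List (String × String)) : Bool :=
  match p.lookup kv.1 with
  | some v' => v' == kv.2
  | none => false

def apply_filters_py_alt (payloads : List (String × List (String × String))) (filters : Option (List (String × String))) : List String :=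
  let fs := filters.getD []                    -- '(filters or {})'
  let candidates := fs.foldl (fun cs kv => cs.filter (fun pr => pvFilterMatch kv pr.2)) payloads
  candidates.map (·.1)

-- ===== PRECONDITION & SPEC =====
def Spec_apply_filters_py (payloads : List (String × List (String × String))) (filters : Option (List (String × String))) (out : List String) : Prop := out = apply_filters_py_alt payloads filters
instance (payloads : List (String × List (String × String))) (filters : Option (List (String × String))) (out : List String) : Decidable (Spec_apply_filters_py payloads filters out) := by unfold Spec_apply_filters_py; infer_instance

-- ===== CLAIM (what is proved, stated in full; the proofs are below) =====
def Claim_equal_apply_filters_py : Prop := ∀ (payloads : List (String × List (String × String))) (filters : Option (List (String × String))), Dom_apply_filters_py payloads filters → Spec_apply_filters_py payloads filters (apply_filters_py payloads filters)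

-- ===== LEMMAS AND PROOFS =====
theorem pvCheckA_eq_all (p : List (String × String)) (fs : List (String × String)) :
    pvCheckA p fs = fs.all (fun kv => pvFilterMatch kv p) := by
  induction fs with
  | nil => rfl
  | cons kv rest ih =>
    obtain ⟨k, v⟩ := kv
    simp only [pvCheckA, List.all_cons, pvFilterMatch]
    cases h : p.lookup k with
    | none => simp
    | some v' =>
      by_cases hv : v' = v
      · simp only [hv, bne_self_eq_false, ih, beq_self_eq_true, Bool.true_and]; rfl
      · simp [hv]

theorem foldl_filter_eq_filter_all (fs : List (String × String))
    (l : List (String × List (String × String))) :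
    fs.foldl (fun cs kv => cs.filter (fun pr => pvFilterMatch kv pr.2)) l
      = l.filter (fun pr => fs.all (fun kv => pvFilterMatch kv pr.2)) := by
  induction fs generalizing l with
  | nil => simp
  | cons kv rest ih =>
    simp only [List.foldl_cons, ih, List.filter_filter, List.all_cons]
    exact List.filter_congr (fun pr _ => by rw [Bool.and_comm])

-- ===== VERDICT (by name: the statement is the Claim_ definition above) =====
theorem apply_filters_py_spec : Claim_equal_apply_filters_py := by
  intro payloads filters _
  unfold Spec_apply_filters_py apply_filters_py apply_filters_py_alt
  cases filters with
  | none => simp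
  | some fs =>
    by_cases h : fs = []
    · simp [h]
    · simp only [h, if_false, Option.getD_some, foldl_filter_eq_filter_all,
        PySem.List.foldl_append_if, List.nil_append]
      congr 1
      exact List.filter_congr (fun pr _ => pvCheckA_eq_all pr.2 fs)
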